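-- pv_equiv track=rewrite | github.com/sudheer-25/Data-Mining-MS-GSP-Algorithm | MSGSP.py | isSubset2
-- ===== SOURCE A (Python) =====
-- def isSubset2(subset,superset):
--     for i in range(0,len(subset)):
--         for j in range(0,len(superset)):
--             if subset[i] == superset[j]:
--                 subset = subset[0:i]+subset[i+1:]
--                 superset = superset[0:j]+superset[j+1:]
--                 return isSubset2(subset, superset)
--     if len(subset) == 0:
--         return True
--     else:
--         return False
-- ===== SOURCE B (Python) =====
-- def isSubset2(subset, superset):
--     # Counting re-implementation: build a frequency table of superset once,
--     # then consume one count per subset element.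
--     counts = {}
--     for x in superset:
--         counts[x] = counts.get(x, 0) + 1
--     for x in subset:
--         c = counts.get(x, 0)
--         if c == 0:
--             return False
--         counts[x] = c - 1
--     return True
-- ===== Notes on version B (the rewrite author's own statement) =====
-- stated objective: faster
-- what changed: Replaces A's repeated nested index scans with a recursive rebuild of both lists by a single hash-count pass: build a frequency dict of superset, then decrement one count per subset element.
import Mathlib
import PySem

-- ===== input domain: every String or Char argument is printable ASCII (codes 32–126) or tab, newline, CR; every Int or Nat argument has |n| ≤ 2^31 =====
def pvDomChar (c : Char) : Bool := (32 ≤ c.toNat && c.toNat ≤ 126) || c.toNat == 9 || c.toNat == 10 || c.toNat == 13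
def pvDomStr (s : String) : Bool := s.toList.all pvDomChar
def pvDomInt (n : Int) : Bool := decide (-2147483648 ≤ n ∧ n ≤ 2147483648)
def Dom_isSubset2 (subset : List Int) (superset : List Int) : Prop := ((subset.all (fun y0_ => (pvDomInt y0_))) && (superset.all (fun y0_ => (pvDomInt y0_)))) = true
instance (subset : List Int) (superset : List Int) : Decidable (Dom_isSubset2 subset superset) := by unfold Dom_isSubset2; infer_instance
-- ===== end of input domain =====

-- B replaces A's recursive nested index scans by a single frequency-dict pass (faster).

-- ===== PORT A =====
-- inner loop: 'for j in range(0,len(superset)): if x == superset[j]' — first matching index j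
def pvFindJ (x : Int) : List Int → Option Nat
  | [] => none
  | y :: ys => if x == y then some 0 else (pvFindJ x ys).map (· + 1)

-- outer loop: first index i of subset whose element matches somewhere in superset, with that j
def pvFindIJ : List Int → List Int → Option (Nat × Nat)
  | [], _ => none
  | x :: xs, sup =>
    match pvFindJ x sup with
    | some j => some (0, j)
    | none => (pvFindIJ xs sup).map (fun p => (p.1 + 1, p.2))

-- needed by isSubset2's termination proof
theorem pvFindIJ_fst_lt (sub sup : List Int) (p : Nat × Nat)
    (h : pvFindIJ sub sup = some p) : p.1 < sub.length := by
  induction sub generalizing p with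
  | nil => simp [pvFindIJ] at h
  | cons x xs ih =>
    simp only [pvFindIJ] at h
    cases hj : pvFindJ x sup with
    | some j => rw [hj] at h; cases h; simp
    | none =>
      rw [hj] at h
      simp only [Option.map_eq_some_iff] at h
      obtain ⟨q, hq, rfl⟩ := h
      have := ih q hq
      simp only [List.length_cons]; omega

-- A's recursion: on the first match remove subset[i] and superset[j]
-- (the slices subset[0:i]+subset[i+1:] are take i ++ drop (i+1)) and recurse;
-- otherwise return len(subset) == 0.
def isSubset2 (subset : List Int) (superset : List Int) : Bool :=
  match h : pvFindIJ subset superset with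
  | some (i, j) =>
      isSubset2 (subset.take i ++ subset.drop (i+1)) (superset.take j ++ superset.drop (j+1))
  | none => decide (subset.length = 0)
termination_by subset.length
decreasing_by
  have := pvFindIJ_fst_lt subset superset (i, j) h
  simp only [List.length_append, List.length_take, List.length_drop]
  omega

-- ===== PORT B =====
-- second loop of Source B: consume one count per subset element, early False on a missing one
def pvConsume : List Int → PySem.Dict Int Int → Bool
  | [], _ => true
  | x :: xs, d =>
    let c := d.getD x 0
    if c == 0 then false else pvConsume xs (d.insert x (c - 1))

def isSubset2_alt (subset : List Int) (superset : List Int) : Bool :=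
  -- first loop of Source B: counts[x] = counts.get(x, 0) + 1
  let counts := superset.foldl (fun d x => d.insert x (d.getD x 0 + 1)) PySem.Dict.empty
  pvConsume subset counts

-- ===== PRECONDITION & SPEC =====
def Spec_isSubset2 (subset : List Int) (superset : List Int) (out : Bool) : Prop := out = isSubset2_alt subset superset
instance (subset : List Int) (superset : List Int) (out : Bool) : Decidable (Spec_isSubset2 subset superset out) := by unfold Spec_isSubset2; infer_instance

-- ===== CLAIM (what is proved, stated in full; the proofs are below) =====
def Claim_equal_isSubset2 : Prop := ∀ (subset : List Int) (superset : List Int), Dom_isSubset2 subset superset → Spec_isSubset2 subset superset (isSubset2 subset superset)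

-- ===== LEMMAS AND PROOFS =====

theorem pvFindJ_none (x : Int) (l : List Int) (h : pvFindJ x l = none) : x ∉ l := by
  induction l with
  | nil => simp
  | cons y ys ih =>
    simp only [pvFindJ] at h
    by_cases hxy : x = y
    · simp [hxy] at h
    · simp [hxy] at h
      simp only [List.mem_cons, not_or]
      exact ⟨hxy, ih h⟩

theorem pvFindJ_some (x : Int) (l : List Int) (j : Nat) (h : pvFindJ x l = some j) :
    l[j]? = some x := by
  induction l generalizing j with
  | nil => simp [pvFindJ] at h
  | cons y ys ih =>
    simp only [pvFindJ] at h
    by_cases hxy : x = y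
    · simp [hxy] at h; simp [← h, hxy]
    · simp only [beq_iff_eq, hxy, if_false, Option.map_eq_some_iff] at h
      obtain ⟨j', hj', rfl⟩ := h
      simpa using ih j' hj'

theorem pvFindIJ_none (sub sup : List Int) (h : pvFindIJ sub sup = none) :
    ∀ x ∈ sub, x ∉ sup := by
  induction sub with
  | nil => simp
  | cons x xs ih =>
    simp only [pvFindIJ] at h
    cases hj : pvFindJ x sup with
    | some j => rw [hj] at h; simp at h
    | none =>
      rw [hj] at h
      simp only [Option.map_eq_none_iff] at h
      intro y hy
      rcases List.mem_cons.mp hy with rfl | hy'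
      · exact pvFindJ_none y sup hj
      · exact ih h y hy'

theorem pvFindIJ_some (sub sup : List Int) (i j : Nat)
    (h : pvFindIJ sub sup = some (i, j)) :
    ∃ v, sub[i]? = some v ∧ sup[j]? = some v := by
  induction sub generalizing i with
  | nil => simp [pvFindIJ] at h
  | cons x xs ih =>
    simp only [pvFindIJ] at h
    cases hj : pvFindJ x sup with
    | some j' =>
      rw [hj] at h; simp at h
      obtain ⟨rfl, rfl⟩ := h
      exact ⟨x, by simp, pvFindJ_some x sup j' hj⟩
    | none =>
      rw [hj] at h
      simp only [Option.map_eq_some_iff] at h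
      obtain ⟨⟨i', j''⟩, hq, hpq⟩ := h
      simp at hpq
      obtain ⟨rfl, rfl⟩ := hpq
      obtain ⟨v, hv1, hv2⟩ := ih i' hq
      exact ⟨v, by simpa using hv1, hv2⟩

-- count after deleting index i (whose element is v), as a Nat subtraction
theorem count_erase_at (l : List Int) (i : Nat) (v y : Int) (hv : l[i]? = some v) :
    (l.take i ++ l.drop (i+1)).count y = l.count y - (if v = y then 1 else 0) := by
  induction l generalizing i with
  | nil => simp at hv
  | cons a t ih =>
    cases i with
    | zero =>
      simp at hv
      subst hv
      by_cases h : a = y <;> simp [h, List.count_cons]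
    | succ i' =>
      simp at hv
      have hmem : v ∈ t := List.mem_of_getElem? hv
      have hcnt : (if v = y then 1 else 0) ≤ t.count y := by
        split
        next h => exact List.one_le_count_iff.mpr (h ▸ hmem)
        next => exact Nat.zero_le _
      have := ih i' hv
      simp only [List.take_succ_cons, List.drop_succ_cons, List.cons_append, List.count_cons]
      rw [this]
      by_cases h : a = y <;> simp [h] <;> omega

-- A computes multiset inclusion (counts pointwise ≤)
theorem A_iff : ∀ (n : Nat) (sub sup : List Int), sub.length ≤ n →
    (isSubset2 sub sup = true ↔ ∀ y, sub.count y ≤ sup.count y) := by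
  intro n
  induction n with
  | zero =>
    intro sub sup hlen
    have : sub = [] := List.eq_nil_of_length_eq_zero (Nat.le_zero.mp hlen)
    subst this
    rw [isSubset2]
    simp [pvFindIJ]
  | succ n ih =>
    intro sub sup hlen
    rw [isSubset2]
    cases hf : pvFindIJ sub sup with
    | none =>
      have hnone := pvFindIJ_none sub sup hf
      simp only [decide_eq_true_eq, List.length_eq_zero_iff]
      constructor
      · rintro rfl; simp
      · intro H
        cases sub with
        | nil => rfl
        | cons x xs =>
          exfalso
          have h1 : 1 ≤ (x :: xs).count x := by simp [List.count_cons]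
          have h2 : sup.count x = 0 := List.count_eq_zero.mpr (hnone x (by simp))
          have := H x
          omega
    | some p =>
      obtain ⟨i, j⟩ := p
      obtain ⟨v, hvi, hvj⟩ := pvFindIJ_some sub sup i j hf
      have hi : i < sub.length := by
        have := pvFindIJ_fst_lt sub sup (i, j) hf
        simpa using this
      have hlen' : (sub.take i ++ sub.drop (i+1)).length ≤ n := by
        simp only [List.length_append, List.length_take, List.length_drop]
        omega
      rw [ih _ _ hlen']
      have hsubmem : v ∈ sub := List.mem_of_getElem? hvi
      have hsupmem : v ∈ sup := List.mem_of_getElem? hvj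
      have hsub1 : 1 ≤ sub.count v := List.one_le_count_iff.mpr hsubmem
      have hsup1 : 1 ≤ sup.count v := List.one_le_count_iff.mpr hsupmem
      constructor
      · intro H y
        have := H y
        rw [count_erase_at sub i v y hvi, count_erase_at sup j v y hvj] at this
        by_cases h : v = y
        · subst h; simp at this; omega
        · simp [h] at this; omega
      · intro H y
        have := H y
        rw [count_erase_at sub i v y hvi, count_erase_at sup j v y hvj]
        by_cases h : v = y
        · subst h; simp; omega
        · simp [h]; omega

-- B's consuming loop computes pointwise ≤ against the dict's counts
theorem consume_iff (xs : List Int) (d : PySem.Dict Int Int)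
    (hd : ∀ y, 0 ≤ d.getD y 0) :
    (pvConsume xs d = true ↔ ∀ y, (xs.count y : Int) ≤ d.getD y 0) := by
  induction xs generalizing d with
  | nil => simpa [pvConsume] using fun y => hd y
  | cons x xs ih =>
    simp only [pvConsume]
    by_cases hc : d.getD x 0 = 0
    · simp only [hc, beq_self_eq_true, if_true]
      constructor
      · intro h; exact absurd h (by simp)
      · intro H
        exfalso
        have := H x
        have hx : 1 ≤ (x :: xs).count x := by simp [List.count_cons]
        rw [hc] at this
        push_cast at this
        omega
    · have hc1 : 1 ≤ d.getD x 0 := by have := hd x; omega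
      simp only [beq_iff_eq, hc, if_false]
      have hd' : ∀ y, 0 ≤ (d.insert x (d.getD x 0 - 1)).getD y 0 := by
        intro y
        rw [PySem.Dict.getD_insert]
        by_cases h : y = x
        · simp [h]; omega
        · simp [h]; exact hd y
      rw [ih _ hd']
      constructor
      · intro H y
        have := H y
        rw [PySem.Dict.getD_insert] at this
        by_cases h : y = x
        · subst h; simp at this; simp [List.count_cons]; push_cast; push_cast at this; omega
        · simp [h] at this; simp [List.count_cons, h]; omega
      · intro H y
        have := H y
        rw [PySem.Dict.getD_insert]
        by_cases h : y = x
        · subst h; simp; simp [List.count_cons] at this; push_cast at this ⊢; omega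
        · simp [h]; simp [List.count_cons, h] at this; omega

theorem alt_iff (sub sup : List Int) :
    (isSubset2_alt sub sup = true ↔ ∀ y, sub.count y ≤ sup.count y) := by
  unfold isSubset2_alt
  have hcnt : ∀ y : Int,
      (sup.foldl (fun d x => d.insert x (d.getD x 0 + 1)) PySem.Dict.empty).getD y 0
        = (sup.count y : Int) := by
    intro y
    rw [PySem.Dict.getD_foldl_insert_add_one]
    simp [PySem.Dict.getD_empty]
  rw [consume_iff _ _ (fun y => by rw [hcnt y]; positivity)]
  constructor
  · intro H y; have := H y; rw [hcnt y] at this; exact_mod_cast this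
  · intro H y; rw [hcnt y]; exact_mod_cast H y

-- ===== VERDICT (by name: the statement is the Claim_ definition above) =====
theorem isSubset2_spec : Claim_equal_isSubset2 := by
  intro sub sup _
  unfold Spec_isSubset2
  rw [Bool.eq_iff_iff, A_iff sub.length sub sup le_rfl, alt_iff]
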